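-- pv_equiv track=rewrite | github.com/gustavnorens/aoc-2023 | solutions/problem1.py | find
-- ===== SOURCE A (Python) =====
-- numbers = ["one", "two", "three", "four", "five", "six", "seven", "eight", "nine"]
--
-- def find(s):
--     lowest = 1000000000000000000000000
--     highest = s.find(numbers[0])
--     lowestNum = numbers[0]
--     highestNum = numbers[0]
--     for elem in numbers:
--         if s.find(elem) < lowest and s.find(elem) >= 0:
--             lowest = s.find(elem)
--             lowestNum = elem
--         if s.rfind(elem) > highest:
--             highest = s.rfind(elem)
--             highestNum = elem
--     return (lowest, lowestNum, highest, highestNum)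
-- ===== SOURCE B (Python) =====
-- numbers = ["one", "two", "three", "four", "five", "six", "seven", "eight", "nine"]
--
-- def find(s):
--     lowest, lowestNum = 10**24, "one"
--     highest, highestNum = -1, "one"
--     for i in range(len(s)):
--         w = next((w for w in numbers if s.startswith(w, i)), None)
--         if w is not None:
--             if i < lowest:
--                 lowest, lowestNum = i, w
--             if i > highest:
--                 highest, highestNum = i, w
--     return (lowest, lowestNum, highest, highestNum)
-- ===== Notes on version B (the rewrite author's own statement) =====
-- stated objective: alternative
-- what changed: A runs find and rfind over the whole string once per number word (and re-evaluates find up to three times per word) and keeps a running min/max over words; B makes one left-to-right scan over string positions, asking at each index which word starts there, recording the first and the last matching position.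
import Mathlib
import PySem

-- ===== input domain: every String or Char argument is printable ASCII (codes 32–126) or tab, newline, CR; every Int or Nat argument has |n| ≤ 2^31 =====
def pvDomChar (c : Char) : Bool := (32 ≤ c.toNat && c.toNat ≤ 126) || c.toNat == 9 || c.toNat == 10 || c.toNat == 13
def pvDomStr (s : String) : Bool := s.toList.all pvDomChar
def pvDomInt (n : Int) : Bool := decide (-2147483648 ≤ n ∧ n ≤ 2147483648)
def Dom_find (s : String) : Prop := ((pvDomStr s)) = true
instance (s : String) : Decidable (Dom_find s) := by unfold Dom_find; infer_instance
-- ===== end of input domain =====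

-- B replaces the nine find/rfind scans of A by ONE left-to-right positional scan that keeps the
-- first and last index where any number word starts (objective: alternative algorithm, same result).

-- ===== PORT A =====
def numbers : List String := ["one", "two", "three", "four", "five", "six", "seven", "eight", "nine"]

-- one iteration of A's `for elem in numbers` loop, state = (lowest, lowestNum, highest, highestNum)
def gA (s : String) (st : Int × String × Int × String) (elem : String) : Int × String × Int × String :=
  let (lowest, lowestNum, highest, highestNum) := st
  let (lowest, lowestNum) :=
    if PySem.Str.find s elem < lowest ∧ 0 ≤ PySem.Str.find s elem then (PySem.Str.find s elem, elem)
    else (lowest, lowestNum)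
  let (highest, highestNum) :=
    if PySem.Str.rfind s elem > highest then (PySem.Str.rfind s elem, elem)
    else (highest, highestNum)
  (lowest, lowestNum, highest, highestNum)

def find (s : String) : Int × String × Int × String :=
  -- numbers[0]: in-range literal index into the constant list, total form pyGetD
  numbers.foldl (gA s)
    ((1000000000000000000000000 : Int), PySem.List.pyGetD numbers 0 "",
      PySem.Str.find s (PySem.List.pyGetD numbers 0 ""), PySem.List.pyGetD numbers 0 "")

-- ===== PORT B =====
-- one iteration of B's `for i in range(len(s))` loop; `next(...)` over numbers is List.find?
def gB (cs : List Char) (st : Int × String × Int × String) (i : Nat) : Int × String × Int × String :=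
  let (lowest, lowestNum, highest, highestNum) := st
  -- s.startswith(w, i): exact for 0 ≤ i — Python checks w against s at offset i, i.e. against s[i:]
  match numbers.find? (fun w => PySem.Chars.startswith (cs.drop i) w.toList) with
  | none => (lowest, lowestNum, highest, highestNum)
  | some w =>
    let (lowest, lowestNum) := if (i : Int) < lowest then ((i : Int), w) else (lowest, lowestNum)
    let (highest, highestNum) := if (i : Int) > highest then ((i : Int), w) else (highest, highestNum)
    (lowest, lowestNum, highest, highestNum)

def find_alt (s : String) : Int × String × Int × String :=
  (List.range s.toList.length).foldl (gB s.toList)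
    ((1000000000000000000000000 : Int), "one", (-1 : Int), "one")

-- ===== PRECONDITION & SPEC =====
def Spec_find (s : String) (out : Int × String × Int × String) : Prop := out = find_alt s
instance (s : String) (out : Int × String × Int × String) : Decidable (Spec_find s out) := by unfold Spec_find; infer_instance

-- ===== CLAIM (what is proved, stated in full; the proofs are below) =====
def Claim_equal_find : Prop := ∀ (s : String), Dom_find s → Spec_find s (find s)

-- ===== LEMMAS AND PROOFS =====

-- first word of `numbers` matching at position i (the value B's `next` computes)
def mOf (cs : List Char) (i : Nat) : Option String :=
  numbers.find? (fun w => PySem.Chars.startswith (cs.drop i) w.toList)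

def matchesOf (cs : List Char) (l : List Nat) : List (Nat × String) :=
  l.filterMap (fun i => (mOf cs i).map (fun w => (i, w)))

def MM (cs : List Char) : List (Nat × String) := matchesOf cs (List.range cs.length)

def lowPart : List (Nat × String) → Int × String
  | [] => ((1000000000000000000000000 : Int), "one")
  | (i0, w0) :: _ =>
      if (i0 : Int) < (1000000000000000000000000 : Int) then ((i0 : Int), w0)
      else ((1000000000000000000000000 : Int), "one")

def highPart (ms : List (Nat × String)) : Int × String :=
  match ms.getLast? with
  | none => ((-1 : Int), "one")
  | some (i, w) => ((i : Int), w)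

def stateOf (ms : List (Nat × String)) : Int × String × Int × String :=
  ((lowPart ms).1, (lowPart ms).2, (highPart ms).1, (highPart ms).2)

-- abbreviations for A's primitives at the char level
def FF (cs : List Char) (w : String) : Int := PySem.Chars.find cs w.toList
def RR (cs : List Char) (w : String) : Int := PySem.Chars.rfind cs w.toList

-- ---------- rfind characterisation (PySem exports no rfind lemmas) ----------
lemma rfind_go_spec (s sub : List Char) (k : Nat) :
    (PySem.Chars.rfind.go s sub k = -1 ∧ ∀ j ≤ k, ¬ sub.isPrefixOf (s.drop j) = true) ∨
    (∃ j, j ≤ k ∧ PySem.Chars.rfind.go s sub k = (j : Int) ∧ sub.isPrefixOf (s.drop j) = true ∧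
      ∀ j', j' ≤ k → sub.isPrefixOf (s.drop j') = true → j' ≤ j) := by
  induction k with
  | zero =>
    by_cases h : sub.isPrefixOf s = true
    · right
      exact ⟨0, le_rfl, by simp [PySem.Chars.rfind.go, h], by simpa using h,
        fun j' hj' _ => hj'⟩
    · left
      refine ⟨by simp [PySem.Chars.rfind.go, h], ?_⟩
      intro j hj
      interval_cases j
      simpa using h
  | succ j ih =>
    by_cases h : sub.isPrefixOf (s.drop (j + 1)) = true
    · right
      exact ⟨j + 1, le_rfl, by simp [PySem.Chars.rfind.go, h], h, fun j' hj' _ => hj'⟩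
    · rcases ih with ⟨he, hall⟩ | ⟨j0, hj0, he, hocc, hmax⟩
      · left
        refine ⟨by simp [PySem.Chars.rfind.go, h, he], ?_⟩
        intro j' hj'
        rcases Nat.lt_or_ge j' (j + 1) with hlt | hge
        · exact hall j' (by omega)
        · have hj'' : j' = j + 1 := by omega
          subst hj''
          exact h
      · right
        refine ⟨j0, by omega, by simp [PySem.Chars.rfind.go, h, he], hocc, ?_⟩
        intro j' hj' ho
        rcases Nat.lt_or_ge j' (j + 1) with hlt | hge
        · exact hmax j' (by omega) ho
        · have hj'' : j' = j + 1 := by omega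
          subst hj''
          exact absurd ho h

lemma RR_nonneg_occ (cs : List Char) (w : String) (h : 0 ≤ RR cs w) :
    w.toList.isPrefixOf (cs.drop (RR cs w).toNat) = true ∧ (RR cs w).toNat ≤ cs.length := by
  have hdef : RR cs w = PySem.Chars.rfind.go cs w.toList cs.length := by
    simp [RR, PySem.Chars.rfind]
  rcases rfind_go_spec cs w.toList cs.length with ⟨he, _⟩ | ⟨j, hj, he, hocc, _⟩
  · rw [hdef, he] at h; omega
  · rw [hdef, he]
    constructor
    · simpa using hocc
    · simpa using hj

lemma le_RR_of_occ (cs : List Char) (w : String) (j : Nat) (hj : j ≤ cs.length)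
    (h : w.toList.isPrefixOf (cs.drop j) = true) : (j : Int) ≤ RR cs w := by
  have hdef : RR cs w = PySem.Chars.rfind.go cs w.toList cs.length := by
    simp [RR, PySem.Chars.rfind]
  rcases rfind_go_spec cs w.toList cs.length with ⟨_, hall⟩ | ⟨j0, _, he, _, hmax⟩
  · exact absurd h (hall j hj)
  · rw [hdef, he]
    exact_mod_cast hmax j hj h

-- ---------- find characterisation (from the PySem library lemmas) ----------
lemma FF_nonneg_occ (cs : List Char) (w : String) (h : 0 ≤ FF cs w) :
    w.toList.isPrefixOf (cs.drop (FF cs w).toNat) = true := by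
  exact List.isPrefixOf_iff_prefix.mpr (PySem.Chars.find_spec h).1

lemma FF_le_of_occ (cs : List Char) (w : String) (j : Nat)
    (h : w.toList.isPrefixOf (cs.drop j) = true) : 0 ≤ FF cs w ∧ FF cs w ≤ (j : Int) := by
  have hpre : w.toList <+: cs.drop j := List.isPrefixOf_iff_prefix.mp h
  have hnn : 0 ≤ FF cs w := by
    rw [FF, PySem.Chars.find_nonneg_iff, ← PySem.Chars.isIn_iff_infix,
      ← PySem.Chars.exists_prefix_drop_iff_isIn]
    exact ⟨j, hpre⟩
  refine ⟨hnn, ?_⟩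
  have hmin := (PySem.Chars.find_spec (s := cs) (sub := w.toList) hnn).2
  by_contra hlt
  have hlt' : j < (FF cs w).toNat := by
    simp only [FF] at *
    omega
  exact hmin j hlt' hpre

-- ---------- the nine words: nonempty, mutually non-prefix ----------
lemma numbers_ne_nil (w : String) (hw : w ∈ numbers) : w.toList ≠ [] := by
  fin_cases hw <;> simp

lemma numbers_nonprefix (w v : String) (hw : w ∈ numbers) (hv : v ∈ numbers)
    (h : w.toList <+: v.toList) : w = v := by
  fin_cases hw <;> fin_cases hv <;> first | rfl | (exfalso; revert h; decide)

lemma occ_unique (cs : List Char) (i : Nat) (w v : String) (hw : w ∈ numbers) (hv : v ∈ numbers)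
    (h1 : w.toList.isPrefixOf (cs.drop i) = true) (h2 : v.toList.isPrefixOf (cs.drop i) = true) :
    w = v := by
  rcases List.prefix_or_prefix_of_prefix (List.isPrefixOf_iff_prefix.mp h1)
      (List.isPrefixOf_iff_prefix.mp h2) with h | h
  · exact numbers_nonprefix w v hw hv h
  · exact (numbers_nonprefix v w hv hw h).symm

lemma occ_lt_length (cs : List Char) (i : Nat) (w : String) (hw : w ∈ numbers)
    (h : w.toList.isPrefixOf (cs.drop i) = true) : i < cs.length := by
  by_contra hge
  have hnil : cs.drop i = [] := List.drop_eq_nil_iff.mpr (by omega)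
  rw [hnil] at h
  have := List.isPrefixOf_iff_prefix.mp h
  exact numbers_ne_nil w hw (List.prefix_nil.mp this)

-- ---------- mOf / MM characterisation ----------
lemma mOf_eq_some_iff (cs : List Char) (i : Nat) (w : String) :
    mOf cs i = some w ↔ w ∈ numbers ∧ w.toList.isPrefixOf (cs.drop i) = true := by
  constructor
  · intro h
    refine ⟨List.mem_of_find?_eq_some h, ?_⟩
    have := List.find?_some h
    simpa [PySem.Chars.startswith] using this
  · rintro ⟨hw, hocc⟩
    have hsome : (mOf cs i).isSome = true := by
      rw [mOf, List.find?_isSome]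
      exact ⟨w, hw, by simpa [PySem.Chars.startswith] using hocc⟩
    rcases Option.isSome_iff_exists.mp hsome with ⟨v, hv⟩
    have hvmem : v ∈ numbers := List.mem_of_find?_eq_some hv
    have hvocc : v.toList.isPrefixOf (cs.drop i) = true := by
      simpa [PySem.Chars.startswith] using List.find?_some hv
    rw [hv, occ_unique cs i v w hvmem hw hvocc hocc]

lemma mem_MM_iff (cs : List Char) (i : Nat) (w : String) :
    (i, w) ∈ MM cs ↔ w ∈ numbers ∧ w.toList.isPrefixOf (cs.drop i) = true := by
  rw [MM, matchesOf, List.mem_filterMap]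
  constructor
  · rintro ⟨a, _, ha⟩
    rcases Option.map_eq_some_iff.mp ha with ⟨v, hv, hpair⟩
    have ha' : a = i := congrArg Prod.fst hpair
    have hv' : v = w := congrArg Prod.snd hpair
    subst ha'; subst hv'
    exact (mOf_eq_some_iff cs a v).mp hv
  · rintro ⟨hw, hocc⟩
    refine ⟨i, List.mem_range.mpr (occ_lt_length cs i w hw hocc), ?_⟩
    rw [(mOf_eq_some_iff cs i w).mpr ⟨hw, hocc⟩]
    rfl

lemma MM_pairwise (cs : List Char) : (MM cs).Pairwise (fun p q => p.1 < q.1) := by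
  rw [MM, matchesOf, List.pairwise_filterMap]
  refine List.Pairwise.imp_of_mem ?_ List.pairwise_lt_range
  intro a b _ _ hab p hp q hq
  rcases Option.map_eq_some_iff.mp hp with ⟨_, _, rfl⟩
  rcases Option.map_eq_some_iff.mp hq with ⟨_, _, rfl⟩
  exact hab

lemma MM_head_min (cs : List Char) (i0 : Nat) (w0 : String) (rest : List (Nat × String))
    (hM : MM cs = (i0, w0) :: rest) (i : Nat) (w : String) (h : (i, w) ∈ MM cs) : i0 ≤ i := by
  have hp := MM_pairwise cs
  rw [hM] at hp h
  rcases List.mem_cons.mp h with he | hm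
  · simp [Prod.ext_iff] at he; omega
  · exact le_of_lt (List.rel_of_pairwise_cons hp hm)

lemma MM_last_max (cs : List Char) (iL : Nat) (wL : String)
    (hM : (MM cs).getLast? = some (iL, wL)) (i : Nat) (w : String) (h : (i, w) ∈ MM cs) : i ≤ iL := by
  have hp : (MM cs).reverse.Pairwise (fun p q => q.1 < p.1) :=
    List.pairwise_reverse.mpr (MM_pairwise cs)
  rw [List.getLast?_eq_head?_reverse] at hM
  have hmr : (i, w) ∈ (MM cs).reverse := List.mem_reverse.mpr h
  rcases hr : (MM cs).reverse with _ | ⟨p, tl⟩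
  · rw [hr] at hM; simp at hM
  · rw [hr] at hM hp hmr
    simp at hM
    subst hM
    rcases List.mem_cons.mp hmr with he | hm
    · simp [Prod.ext_iff] at he; omega
    · exact le_of_lt (List.rel_of_pairwise_cons hp hm)

-- ---------- B equals stateOf (MM cs) ----------
lemma matchesOf_cons (cs : List Char) (i : Nat) (l : List Nat) :
    matchesOf cs (i :: l) = matchesOf cs [i] ++ matchesOf cs l := by
  cases hm : mOf cs i <;> simp [matchesOf, hm]

lemma gB_apply_none (cs : List Char) (a : Int) (b : String) (c : Int) (d : String) (i : Nat)
    (h : mOf cs i = none) : gB cs (a, b, c, d) i = (a, b, c, d) := by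
  simp only [gB,
    show numbers.find? (fun w => PySem.Chars.startswith (cs.drop i) w.toList) = mOf cs i from rfl, h]

lemma gB_apply_some (cs : List Char) (a : Int) (b : String) (c : Int) (d : String) (i : Nat)
    (w : String) (h : mOf cs i = some w) :
    gB cs (a, b, c, d) i =
      ((if (i : Int) < a then ((i : Int), w) else (a, b)).1,
       (if (i : Int) < a then ((i : Int), w) else (a, b)).2,
       (if (i : Int) > c then ((i : Int), w) else (c, d)).1,
       (if (i : Int) > c then ((i : Int), w) else (c, d)).2) := by
  simp only [gB,
    show numbers.find? (fun w => PySem.Chars.startswith (cs.drop i) w.toList) = mOf cs i from rfl, h]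

lemma gB_step (cs : List Char) (ms : List (Nat × String)) (i : Nat)
    (hgt : ∀ p ∈ ms, p.1 < i) :
    gB cs (stateOf ms) i = stateOf (ms ++ matchesOf cs [i]) := by
  cases hm : mOf cs i with
  | none =>
    rw [show stateOf ms = ((lowPart ms).1, (lowPart ms).2, (highPart ms).1, (highPart ms).2)
        from rfl, gB_apply_none _ _ _ _ _ _ hm,
      show matchesOf cs [i] = [] by simp [matchesOf, hm], List.append_nil]
    rfl
  | some w =>
    have hml : matchesOf cs [i] = [(i, w)] := by simp [matchesOf, hm]
    rw [hml, show stateOf ms = ((lowPart ms).1, (lowPart ms).2, (highPart ms).1, (highPart ms).2)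
        from rfl, gB_apply_some _ _ _ _ _ _ _ hm]
    have hhigh : highPart (ms ++ [(i, w)]) = ((i : Int), w) := by
      simp [highPart, List.getLast?_append]
    have hhi : (highPart ms).1 < (i : Int) := by
      cases hL : ms.getLast? with
      | none => simp [highPart, hL]; omega
      | some q =>
        obtain ⟨qi, qw⟩ := q
        have hq := hgt (qi, qw) (List.mem_of_getLast? hL)
        simp only at hq
        simp [highPart, hL]
        omega
    have hlow2 : (if (i : Int) < (lowPart ms).1 then ((i : Int), w)
        else ((lowPart ms).1, (lowPart ms).2)) = lowPart (ms ++ [(i, w)]) := by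
      cases ms with
      | nil => rfl
      | cons p t =>
        obtain ⟨i0, w0⟩ := p
        have hi0 : i0 < i := hgt (i0, w0) List.mem_cons_self
        rw [show ((i0, w0) :: t) ++ [(i, w)] = (i0, w0) :: (t ++ [(i, w)]) from rfl]
        by_cases hb : (i0 : Int) < 1000000000000000000000000
        · rw [show lowPart ((i0, w0) :: t) = ((i0 : Int), w0) by rw [lowPart, if_pos hb],
            show lowPart ((i0, w0) :: (t ++ [(i, w)])) = ((i0 : Int), w0) by
              rw [lowPart, if_pos hb],
            if_neg (by omega)]
        · rw [show lowPart ((i0, w0) :: t) = (1000000000000000000000000, "one") by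
              rw [lowPart, if_neg hb],
            show lowPart ((i0, w0) :: (t ++ [(i, w)])) = (1000000000000000000000000, "one") by
              rw [lowPart, if_neg hb],
            if_neg (by omega)]
    rw [stateOf, ← hlow2, hhigh,
      if_pos (show (i : Int) > (highPart ms).1 from hhi)]

lemma foldB (cs : List Char) (l : List Nat) (ms : List (Nat × String))
    (hgt : ∀ j ∈ l, ∀ p ∈ ms, p.1 < j) (hp : l.Pairwise (· < ·)) :
    List.foldl (gB cs) (stateOf ms) l = stateOf (ms ++ matchesOf cs l) := by
  induction l generalizing ms with
  | nil => simp [matchesOf]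
  | cons i l' ih =>
    have hone : ∀ p ∈ matchesOf cs [i], p.1 = i := by
      intro p hp'
      cases hm : mOf cs i <;> simp [matchesOf, hm] at hp'
      rw [hp']
    have hsplit : ms ++ matchesOf cs [i] ++ matchesOf cs l' = ms ++ matchesOf cs (i :: l') := by
      rw [List.append_assoc, ← matchesOf_cons]
    rw [List.foldl_cons, gB_step cs ms i (hgt i List.mem_cons_self), ← hsplit]
    refine ih (ms ++ matchesOf cs [i]) ?_ hp.of_cons
    intro j hj p hpm
    rcases List.mem_append.mp hpm with hpm | hpm
    · exact hgt j (List.mem_cons_of_mem i hj) p hpm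
    · rw [hone p hpm]
      exact List.rel_of_pairwise_cons hp hj

lemma find_alt_eq (s : String) : find_alt s = stateOf (MM s.toList) := by
  have h := foldB s.toList (List.range s.toList.length) [] (by simp) List.pairwise_lt_range
  simpa [find_alt, stateOf, lowPart, highPart, MM] using h

-- ---------- A's loop invariants ----------
def Plow (cs : List Char) (ws : List String) (lo : Int) (lon : String) : Prop :=
  (lo = 1000000000000000000000000 ∧ lon = "one" ∧
      ∀ w ∈ ws, ¬(0 ≤ FF cs w ∧ FF cs w < 1000000000000000000000000)) ∨
  (0 ≤ lo ∧ lo < 1000000000000000000000000 ∧ lon ∈ ws ∧ FF cs lon = lo ∧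
      ∀ w ∈ ws, 0 ≤ FF cs w → lo ≤ FF cs w)

def Qhigh (cs : List Char) (ws : List String) (hi : Int) (hin : String) : Prop :=
  (hi = FF cs "one" ∧ hin = "one" ∧ ∀ w ∈ ws, RR cs w ≤ FF cs "one") ∨
  (hin ∈ ws ∧ RR cs hin = hi ∧ FF cs "one" < hi ∧ ∀ w ∈ ws, RR cs w ≤ hi)

lemma Plow_step (cs : List Char) (pre : List String) (lo : Int) (lon : String) (elem : String)
    (h : Plow cs pre lo lon) :
    Plow cs (pre ++ [elem])
      (if FF cs elem < lo ∧ 0 ≤ FF cs elem then (FF cs elem, elem) else (lo, lon)).1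
      (if FF cs elem < lo ∧ 0 ≤ FF cs elem then (FF cs elem, elem) else (lo, lon)).2 := by
  by_cases hc : FF cs elem < lo ∧ 0 ≤ FF cs elem
  · rw [if_pos hc]
    right
    refine ⟨hc.2, ?_, List.mem_append.mpr (Or.inr List.mem_cons_self), rfl, ?_⟩
    · rcases h with ⟨h1, _, _⟩ | ⟨_, h2, _, _, _⟩ <;> omega
    · intro w hw hfw
      rcases List.mem_append.mp hw with hw | hw
      · rcases h with ⟨h1, _, hall⟩ | ⟨_, _, _, _, hmin⟩
        · have := hall w hw; omega
        · have := hmin w hw hfw; omega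
      · simp at hw; subst hw; omega
  · rw [if_neg hc]
    rcases h with ⟨h1, h2, h3⟩ | ⟨h1, h2, h3, h4, h5⟩
    · left
      refine ⟨h1, h2, ?_⟩
      intro w hw
      rcases List.mem_append.mp hw with hw | hw
      · exact h3 w hw
      · simp at hw; subst hw; omega
    · right
      refine ⟨h1, h2, List.mem_append.mpr (Or.inl h3), h4, ?_⟩
      intro w hw hfw
      rcases List.mem_append.mp hw with hw | hw
      · exact h5 w hw hfw
      · simp at hw; subst hw; omega

lemma Qhigh_step (cs : List Char) (pre : List String) (hi : Int) (hin : String) (elem : String)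
    (h : Qhigh cs pre hi hin) :
    Qhigh cs (pre ++ [elem])
      (if RR cs elem > hi then (RR cs elem, elem) else (hi, hin)).1
      (if RR cs elem > hi then (RR cs elem, elem) else (hi, hin)).2 := by
  by_cases hc : RR cs elem > hi
  · rw [if_pos hc]
    right
    refine ⟨List.mem_append.mpr (Or.inr List.mem_cons_self), rfl, ?_, ?_⟩
    · rcases h with ⟨h1, _, _⟩ | ⟨_, _, h3, _⟩ <;> omega
    · intro w hw
      rcases List.mem_append.mp hw with hw | hw
      · rcases h with ⟨h1, _, hall⟩ | ⟨_, _, _, hmax⟩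
        · have := hall w hw; omega
        · have := hmax w hw; omega
      · simp at hw; subst hw; omega
  · rw [if_neg hc]
    rcases h with ⟨h1, h2, h3⟩ | ⟨h1, h2, h3, h4⟩
    · left
      refine ⟨h1, h2, ?_⟩
      intro w hw
      rcases List.mem_append.mp hw with hw | hw
      · exact h3 w hw
      · simp at hw; subst hw; omega
    · right
      refine ⟨List.mem_append.mpr (Or.inl h1), h2, h3, ?_⟩
      intro w hw
      rcases List.mem_append.mp hw with hw | hw
      · exact h4 w hw
      · simp at hw; subst hw; omega

lemma foldA (cs : List Char) (s : String) (hs : s.toList = cs) :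
    ∀ (ws pre : List String) (st : Int × String × Int × String),
      Plow cs pre st.1 st.2.1 → Qhigh cs pre st.2.2.1 st.2.2.2 →
      Plow cs (pre ++ ws) (List.foldl (gA s) st ws).1 (List.foldl (gA s) st ws).2.1 ∧
      Qhigh cs (pre ++ ws) (List.foldl (gA s) st ws).2.2.1 (List.foldl (gA s) st ws).2.2.2 := by
  intro ws
  induction ws with
  | nil =>
    intro pre st hP hQ
    simpa using ⟨hP, hQ⟩
  | cons e ws' ih =>
    intro pre st hP hQ
    obtain ⟨a, b, c, d⟩ := st
    have hgAeq : gA s (a, b, c, d) e =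
        ((if FF cs e < a ∧ 0 ≤ FF cs e then (FF cs e, e) else (a, b)).1,
         (if FF cs e < a ∧ 0 ≤ FF cs e then (FF cs e, e) else (a, b)).2,
         (if RR cs e > c then (RR cs e, e) else (c, d)).1,
         (if RR cs e > c then (RR cs e, e) else (c, d)).2) := by
      simp [gA, PySem.Str.find_eq, PySem.Str.rfind_eq, hs, FF, RR]
    rw [List.foldl_cons, hgAeq, List.append_cons]
    exact ih (pre ++ [e]) _ (Plow_step cs pre a b e hP) (Qhigh_step cs pre c d e hQ)

lemma low_eq (cs : List Char) (lo : Int) (lon : String) (h : Plow cs numbers lo lon) :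
    (lo, lon) = lowPart (MM cs) := by
  rcases hM : MM cs with _ | ⟨⟨i0, w0⟩, rest⟩
  · rcases h with ⟨h1, h2, _⟩ | ⟨h1, h2, h3, h4, _⟩
    · rw [lowPart, h1, h2]
    · exfalso
      have hocc := FF_nonneg_occ cs lon (by omega)
      have hmem : ((FF cs lon).toNat, lon) ∈ MM cs := (mem_MM_iff cs _ lon).mpr ⟨h3, hocc⟩
      rw [hM] at hmem
      simp at hmem
  · have hhead : (i0, w0) ∈ MM cs := by rw [hM]; exact List.mem_cons_self
    obtain ⟨hw0, hocc0⟩ := (mem_MM_iff cs i0 w0).mp hhead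
    have hF0 := FF_le_of_occ cs w0 i0 hocc0
    by_cases hbig : (i0 : Int) < 1000000000000000000000000
    · rcases h with ⟨h1, h2, h3⟩ | ⟨h1, h2, h3, h4, h5⟩
      · exact absurd ⟨hF0.1, by omega⟩ (h3 w0 hw0)
      · have hoccl : lon.toList.isPrefixOf (cs.drop lo.toNat) = true := by
          have := FF_nonneg_occ cs lon (by omega)
          rwa [h4] at this
        have hlomem : (lo.toNat, lon) ∈ MM cs := (mem_MM_iff cs _ lon).mpr ⟨h3, hoccl⟩
        have hge : i0 ≤ lo.toNat := MM_head_min cs i0 w0 rest hM _ _ hlomem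
        have hle : lo ≤ (i0 : Int) := le_trans (h5 w0 hw0 hF0.1) hF0.2
        have hloeq : lo = (i0 : Int) := by omega
        have hlon : lon = w0 := by
          have h1' : (i0, lon) ∈ MM cs := by
            rwa [show lo.toNat = i0 by omega] at hlomem
          obtain ⟨hlmem, hlocc⟩ := (mem_MM_iff cs i0 lon).mp h1'
          exact occ_unique cs i0 lon w0 hlmem hw0 hlocc hocc0
        rw [lowPart, if_pos hbig, hloeq, hlon]
    · rcases h with ⟨h1, h2, _⟩ | ⟨h1, h2, h3, h4, h5⟩
      · rw [lowPart, if_neg hbig, h1, h2]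
      · exfalso
        have hoccl : lon.toList.isPrefixOf (cs.drop lo.toNat) = true := by
          have := FF_nonneg_occ cs lon (by omega)
          rwa [h4] at this
        have hlomem : (lo.toNat, lon) ∈ MM cs := (mem_MM_iff cs _ lon).mpr ⟨h3, hoccl⟩
        have hge : i0 ≤ lo.toNat := MM_head_min cs i0 w0 rest hM _ _ hlomem
        omega

lemma high_eq (cs : List Char) (hi : Int) (hin : String) (h : Qhigh cs numbers hi hin) :
    (hi, hin) = highPart (MM cs) := by
  have hone : ("one" : String) ∈ numbers := by simp [numbers]
  cases hL : (MM cs).getLast? with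
  | none =>
    have hnil : MM cs = [] := List.getLast?_eq_none_iff.mp hL
    have hFone : FF cs "one" = -1 := by
      by_contra hne
      have hnn : 0 ≤ FF cs "one" := by
        have := PySem.Chars.neg_one_le_find cs ("one" : String).toList
        simp only [FF] at *
        omega
      have hmem : ((FF cs "one").toNat, "one") ∈ MM cs :=
        (mem_MM_iff cs _ _).mpr ⟨hone, FF_nonneg_occ cs "one" hnn⟩
      rw [hnil] at hmem
      simp at hmem
    rcases h with ⟨h1, h2, _⟩ | ⟨h1, h2, h3, _⟩
    · rw [highPart, hL, h1, h2, hFone]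
    · exfalso
      have hnn : 0 ≤ hi := by
        have := PySem.Chars.neg_one_le_find cs ("one" : String).toList
        simp only [FF] at h3
        omega
      obtain ⟨hocch, _⟩ := RR_nonneg_occ cs hin (by omega)
      have hmem : ((RR cs hin).toNat, hin) ∈ MM cs :=
        (mem_MM_iff cs _ _).mpr ⟨h1, hocch⟩
      rw [hnil] at hmem
      simp at hmem
  | some p =>
    obtain ⟨iL, wL⟩ := p
    have hmemL : (iL, wL) ∈ MM cs := List.mem_of_getLast? hL
    obtain ⟨hwL, hoccL⟩ := (mem_MM_iff cs iL wL).mp hmemL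
    have hiLn : iL < cs.length := occ_lt_length cs iL wL hwL hoccL
    have hRL : (iL : Int) ≤ RR cs wL := le_RR_of_occ cs wL iL (le_of_lt hiLn) hoccL
    rcases h with ⟨h1, h2, h3⟩ | ⟨h1, h2, h3, h4⟩
    · have hFone1 : RR cs wL ≤ FF cs "one" := h3 wL hwL
      have hnn : 0 ≤ FF cs "one" := by omega
      have hocc1 := FF_nonneg_occ cs "one" hnn
      have hmem1 : ((FF cs "one").toNat, "one") ∈ MM cs :=
        (mem_MM_iff cs _ _).mpr ⟨hone, hocc1⟩
      have hle := MM_last_max cs iL wL hL _ _ hmem1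
      have heq : FF cs "one" = (iL : Int) := by omega
      have hocc1' : ("one" : String).toList.isPrefixOf (cs.drop iL) = true := by
        rwa [show (FF cs "one").toNat = iL by omega] at hocc1
      have hwLone : wL = "one" := occ_unique cs iL wL "one" hwL hone hoccL hocc1'
      rw [highPart, hL, h1, h2, heq, hwLone]
    · have h5 := h4 wL hwL
      have hhi0 : 0 ≤ hi := by omega
      obtain ⟨hocch, _⟩ := RR_nonneg_occ cs hin (by omega)
      have hmemh : ((RR cs hin).toNat, hin) ∈ MM cs :=
        (mem_MM_iff cs _ _).mpr ⟨h1, hocch⟩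
      have hleh := MM_last_max cs iL wL hL _ _ hmemh
      have hhieq : hi = (iL : Int) := by omega
      have hocch' : hin.toList.isPrefixOf (cs.drop iL) = true := by
        rwa [show (RR cs hin).toNat = iL by omega] at hocch
      have hhinL : hin = wL := occ_unique cs iL hin wL h1 hwL hocch' hoccL
      rw [highPart, hL, hhieq, hhinL]

lemma find_eq (s : String) : find s = stateOf (MM s.toList) := by
  have hinit : find s = numbers.foldl (gA s)
      ((1000000000000000000000000 : Int), "one", PySem.Str.find s "one", "one") := rfl
  have hfone : PySem.Str.find s "one" = FF s.toList "one" := by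
    rw [PySem.Str.find_eq]; rfl
  have h := foldA s.toList s rfl numbers []
    ((1000000000000000000000000 : Int), "one", FF s.toList "one", "one")
    (Or.inl ⟨rfl, rfl, by simp⟩) (Or.inl ⟨rfl, rfl, by simp⟩)
  rw [List.nil_append] at h
  have hl := low_eq s.toList _ _ h.1
  have hh := high_eq s.toList _ _ h.2
  rw [hinit, hfone, stateOf, ← hl, ← hh]

-- ===== VERDICT (by name: the statement is the Claim_ definition above) =====
theorem find_spec : Claim_equal_find := by
  intro s _
  unfold Spec_find
  rw [find_eq, find_alt_eq]
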